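-- pv_equiv track=rewrite | github.com/Oufattole/smolyak | smolyak.py | generate_k
-- ===== SOURCE A (Python) =====
-- def generate_k(dim, l, k_left=None):
--     if k_left == None:
--         k_left = l+dim-1
--     for k_i in range(1,k_left+1):
--         next_k_left = k_left-k_i
--         next_dim = dim-1
--         if next_k_left >= next_dim:
--             if dim == 1:
--                 yield [k_i]
--             else:
--                 for k in generate_k(next_dim, l, next_k_left):
--                     yield [k_i]+k
-- ===== SOURCE B (Python) =====
-- def generate_k(dim, l, k_left=None):
--     if k_left is None:
--         k_left = l + dim - 1
--     stack = [([], k_left, dim)]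
--     while stack:
--         prefix, kl, d = stack.pop()
--         if d == 1:
--             for k_i in range(1, kl + 1):
--                 yield prefix + [k_i]
--         else:
--             for k_i in range(kl, 0, -1):
--                 nkl = kl - k_i
--                 if nkl >= d - 1:
--                     stack.append((prefix + [k_i], nkl, d - 1))
-- ===== Notes on version B (the rewrite author's own statement) =====
-- stated objective: alternative
-- what changed: The recursive generator is replaced by an iterative depth-first traversal over an explicit stack of (prefix, budget, dim) frames, pushing children in descending order so the lexicographic yield order is preserved without recursion.
import Mathlib
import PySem

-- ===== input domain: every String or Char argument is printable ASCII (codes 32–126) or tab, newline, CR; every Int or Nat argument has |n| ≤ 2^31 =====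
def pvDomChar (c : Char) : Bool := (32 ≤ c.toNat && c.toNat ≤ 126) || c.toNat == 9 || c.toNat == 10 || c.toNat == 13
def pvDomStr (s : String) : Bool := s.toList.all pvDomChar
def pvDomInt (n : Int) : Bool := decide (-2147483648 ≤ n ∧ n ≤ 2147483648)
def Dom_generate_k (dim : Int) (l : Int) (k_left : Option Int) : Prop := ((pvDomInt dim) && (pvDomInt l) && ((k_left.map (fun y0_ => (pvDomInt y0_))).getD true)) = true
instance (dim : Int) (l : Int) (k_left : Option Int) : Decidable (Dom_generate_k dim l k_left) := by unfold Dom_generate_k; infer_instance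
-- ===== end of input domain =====

-- B replaces A's recursive generator by an iterative depth-first traversal over an explicit
-- stack of (prefix, k_left, dim) frames; same yields in the same order, no recursion.

-- ===== PORT A =====
-- literal port of A's recursive generator; the yields are collected in order
def generate_k_go (dim : Int) (kl : Int) : List (List Int) :=
  (PySem.List.pyRange 1 (kl + 1) 1).attach.flatMap (fun k_i =>
    let next_k_left := kl - k_i.1
    let next_dim := dim - 1
    if next_k_left ≥ next_dim then
      if dim = 1 then [[k_i.1]]
      else (generate_k_go next_dim next_k_left).map (fun k => k_i.1 :: k)
    else [])
termination_by kl.toNat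
decreasing_by
  have := PySem.List.mem_pyRange_one.mp k_i.2
  omega

def generate_k (dim : Int) (l : Int) (k_left : Option Int) : List (List Int) :=
  match k_left with
  | none => generate_k_go dim (l + dim - 1)
  | some kl => generate_k_go dim kl

-- ===== PORT B =====
-- a frame is (prefix, k_left, dim); the stack's head is its top (Python's list end),
-- so Python's sequence of appends becomes a reversed block consed in front
def pvFrameWeight (f : List Int × Int × Int) : Nat := 2 ^ f.2.1.toNat

def pvStackWeight (stack : List (List Int × Int × Int)) : Nat :=
  (stack.map pvFrameWeight).sum

-- termination bound for the stack loop: the pushed children weigh less than the popped frame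
theorem pvSumRangeDown (n : Nat) : ∀ kl : Int, kl.toNat = n →
    ((PySem.List.pyRange kl 0 (-1)).map (fun k_i => (2:Nat) ^ ((kl - k_i).toNat))).sum
      = 2 ^ n - 1 := by
  induction n with
  | zero =>
    intro kl h
    rw [PySem.List.pyRange_neg_one_eq_nil (by omega)]
    simp
  | succ m ih =>
    intro kl h
    rw [PySem.List.pyRange_neg_one_cons (by omega : (0:Int) < kl)]
    simp only [List.map_cons, List.sum_cons]
    have hc : ((PySem.List.pyRange (kl - 1) 0 (-1)).map
          (fun k_i => (2:Nat) ^ ((kl - k_i).toNat))).sum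
        = ((PySem.List.pyRange (kl - 1) 0 (-1)).map
          (fun k_i => 2 * (2:Nat) ^ (((kl - 1) - k_i).toNat))).sum := by
      apply congrArg
      apply List.map_congr_left
      intro x hx
      have hm := PySem.List.mem_pyRange_neg_one.mp hx
      have he : (kl - x).toNat = ((kl - 1) - x).toNat + 1 := by omega
      rw [he, pow_succ]
      ring
    rw [hc, List.sum_map_mul_left, ih (kl - 1) (by omega)]
    have h1 : 1 ≤ 2 ^ m := Nat.one_le_two_pow
    have he : (kl - kl).toNat = 0 := by omega
    rw [he, pow_succ]
    omega

theorem pvChildrenWeight_lt (p : List Int) (kl d : Int) :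
    (((((PySem.List.pyRange kl 0 (-1)).filter
        (fun k_i => decide (kl - k_i ≥ d - 1))).map
        (fun k_i => (p ++ [k_i], kl - k_i, d - 1))).reverse).map pvFrameWeight).sum
      < 2 ^ kl.toNat := by
  rw [List.map_reverse, List.sum_reverse, List.map_map]
  have hle : ((((PySem.List.pyRange kl 0 (-1)).filter
        (fun k_i => decide (kl - k_i ≥ d - 1))).map
        (pvFrameWeight ∘ fun k_i => (p ++ [k_i], kl - k_i, d - 1))).sum)
      ≤ ((PySem.List.pyRange kl 0 (-1)).map
        (pvFrameWeight ∘ fun k_i => (p ++ [k_i], kl - k_i, d - 1))).sum :=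
    (List.filter_sublist.map _).sum_le_sum (fun x _ => Nat.zero_le x)
  refine lt_of_le_of_lt hle ?_
  have hmc : (PySem.List.pyRange kl 0 (-1)).map
        (pvFrameWeight ∘ fun k_i => (p ++ [k_i], kl - k_i, d - 1))
      = (PySem.List.pyRange kl 0 (-1)).map (fun k_i => (2:Nat) ^ ((kl - k_i).toNat)) := by
    apply List.map_congr_left
    intro x _
    rfl
  rw [hmc, pvSumRangeDown kl.toNat kl rfl]
  have h1 : 1 ≤ 2 ^ kl.toNat := Nat.one_le_two_pow
  omega

def generate_k_loop (stack : List (List Int × Int × Int)) (acc : List (List Int)) :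
    List (List Int) :=
  match stack with
  | [] => acc
  | (prefix_, kl, d) :: rest =>
    if d = 1 then
      generate_k_loop rest
        (acc ++ (PySem.List.pyRange 1 (kl + 1) 1).map (fun k_i => prefix_ ++ [k_i]))
    else
      generate_k_loop
        (((((PySem.List.pyRange kl 0 (-1)).filter
            (fun k_i => decide (kl - k_i ≥ d - 1))).map
            (fun k_i => (prefix_ ++ [k_i], kl - k_i, d - 1))).reverse) ++ rest) acc
termination_by pvStackWeight stack
decreasing_by
  · simp only [pvStackWeight, List.map_cons, List.sum_cons]
    have : 0 < pvFrameWeight (prefix_, kl, d) := Nat.two_pow_pos _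
    omega
  · simp only [pvStackWeight, List.map_cons, List.sum_cons, List.map_append, List.sum_append]
    have := pvChildrenWeight_lt prefix_ kl d
    have : pvFrameWeight (prefix_, kl, d) = 2 ^ kl.toNat := rfl
    omega

def generate_k_alt (dim : Int) (l : Int) (k_left : Option Int) : List (List Int) :=
  let kl := match k_left with
    | none => l + dim - 1
    | some kl => kl
  generate_k_loop [(([] : List Int), kl, dim)] []

-- ===== PRECONDITION & SPEC =====
-- Pre_ excludes inputs whose effective starting budget k_left (or l+dim-1) exceeds 900 while
-- the recursion in A can actually descend (budget not below dim, and dim outside 1..900):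
-- there A's recursion depth reaches the interpreter limit and A raises RecursionError
-- (or cannot finish enumerating); on every other input A returns normally.
def Pre_generate_k (dim : Int) (l : Int) (k_left : Option Int) : Prop :=
  (1 ≤ dim ∧ (dim ≤ 900 ∨ k_left.getD (l + dim - 1) < dim)) ∨ k_left.getD (l + dim - 1) ≤ 900
instance (dim : Int) (l : Int) (k_left : Option Int) : Decidable (Pre_generate_k dim l k_left) := by unfold Pre_generate_k; infer_instance
def pvWitness_generate_k : Int × Int × Option Int := (3, 3, none)
def Spec_generate_k (dim : Int) (l : Int) (k_left : Option Int) (out : List (List Int)) : Prop := out = generate_k_alt dim l k_left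
instance (dim : Int) (l : Int) (k_left : Option Int) (out : List (List Int)) : Decidable (Spec_generate_k dim l k_left out) := by unfold Spec_generate_k; infer_instance

-- ===== CLAIM (what is proved, stated in full; the proofs are below) =====
def Claim_equal_generate_k : Prop := ∀ (dim : Int) (l : Int) (k_left : Option Int), Dom_generate_k dim l k_left → Pre_generate_k dim l k_left → Spec_generate_k dim l k_left (generate_k dim l k_left)

-- ===== LEMMAS AND PROOFS =====

-- unfolding of A's recursion without `attach`
theorem generate_k_go_eq (dim kl : Int) :
    generate_k_go dim kl = (PySem.List.pyRange 1 (kl + 1) 1).flatMap (fun k_i =>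
      if kl - k_i ≥ dim - 1 then
        if dim = 1 then [[k_i]]
        else (generate_k_go (dim - 1) (kl - k_i)).map (fun k => k_i :: k)
      else []) := by
  rw [generate_k_go]
  simp [List.flatMap_def]

theorem pyflatMap_filter (q : Int → Bool) (f : Int → List (List Int)) :
    ∀ l : List Int, (l.filter q).flatMap f = l.flatMap (fun x => if q x then f x else []) := by
  intro l
  induction l with
  | nil => rfl
  | cons a t ih =>
    by_cases h : q a <;> simp [h, ih]

def pvExpand (f : List Int × Int × Int) : List (List Int) :=
  (generate_k_go f.2.2 f.2.1).map (fun v => f.1 ++ v)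

-- one-frame expansion: the children B pushes produce exactly A's block for that frame
theorem pvExpand_frame (p : List Int) (kl d : Int) (hd : ¬ d = 1) :
    (((((PySem.List.pyRange kl 0 (-1)).filter
        (fun k_i => decide (kl - k_i ≥ d - 1))).map
        (fun k_i => (p ++ [k_i], kl - k_i, d - 1))).reverse)).flatMap pvExpand
      = pvExpand (p, kl, d) := by
  rw [PySem.List.pyRange_neg_one_eq_reverse]
  simp only [Int.zero_add, List.filter_reverse, List.map_reverse, List.reverse_reverse]
  show ((((PySem.List.pyRange 1 (kl + 1) 1).filter
      (fun k_i => decide (kl - k_i ≥ d - 1))).map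
      (fun k_i => (p ++ [k_i], kl - k_i, d - 1))).flatMap pvExpand) = _
  rw [List.flatMap_map, pyflatMap_filter]
  show _ = (generate_k_go d kl).map (fun v => p ++ v)
  rw [generate_k_go_eq d kl, List.map_flatMap]
  apply List.flatMap_congr
  intro x _
  by_cases h : kl - x ≥ d - 1
  · simp only [h, if_pos, decide_true, if_neg hd]
    show pvExpand (p ++ [x], kl - x, d - 1) = _
    unfold pvExpand
    simp only [List.map_map]
    apply List.map_congr_left
    intro v _
    simp
  · simp [h]

theorem flatMap_eq_map_of {a b : Type} (l : List a) (f : a -> List b) (g : a -> b)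
    (h : forall x, x ∈ l -> f x = [g x]) : l.flatMap f = l.map g := by
  induction l with
  | nil => rfl
  | cons y t ih =>
    simp only [List.flatMap_cons, List.map_cons, h y (by simp)]
    rw [ih (fun x hx => h x (by simp [hx]))]
    rfl

theorem generate_k_loop_eq (stack : List (List Int × Int × Int)) (acc : List (List Int)) :
    generate_k_loop stack acc = acc ++ stack.flatMap pvExpand := by
  induction stack, acc using generate_k_loop.induct with
  | case1 acc => simp [generate_k_loop]
  | case2 =>
    rename_i acc p kl rest ih
    rw [generate_k_loop, if_pos rfl, ih]
    have hone : pvExpand (p, kl, 1)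
        = (PySem.List.pyRange 1 (kl + 1) 1).map (fun k_i => p ++ [k_i]) := by
      unfold pvExpand
      show (generate_k_go 1 kl).map (fun v => p ++ v) = _
      rw [generate_k_go_eq]
      rw [flatMap_eq_map_of _ _ (fun k_i => [k_i]) (fun x hx => by
        have := PySem.List.mem_pyRange_one.mp hx
        rw [if_pos (by omega : kl - x ≥ (1:Int) - 1), if_pos rfl])]
      simp
    simp [hone]
  | case3 =>
    rename_i acc p kl d rest hd ih
    rw [generate_k_loop, if_neg hd, ih]
    rw [List.flatMap_cons, List.flatMap_append, pvExpand_frame p kl d hd]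

-- ===== VERDICT (by name: the statement is the Claim_ definition above) =====
theorem generate_k_spec : Claim_equal_generate_k := by
  intro dim l k_left _ _
  unfold Spec_generate_k generate_k generate_k_alt
  cases k_left <;> simp [generate_k_loop_eq, pvExpand]
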